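-- pv_equiv track=rewrite | github.com/gklqmul/RadarDataset | data/operation/StaticClass.py | _split_actions
-- ===== SOURCE A (Python) =====
-- def _split_actions(is_stationary):
--     """
--     根据静止帧分割动作序列
--     :param is_stationary: 每一帧是否为静止帧的布尔数组
--     :return: 分割后的动作段列表
--     """
--     action_segments = []
--     current_segment = []
--
--     for frame_idx, stationary in enumerate(is_stationary):
--         if stationary:
--             # 检测到静止帧，结束当前动作段
--             if current_segment:
--                 action_segments.append(current_segment)
--                 current_segment = []
--         else:
--             # 继续当前动作段
--             current_segment.append(frame_idx)
--
--     # 添加最后一个动作段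
--     if current_segment:
--         action_segments.append(current_segment)
--
--     return action_segments
-- ===== SOURCE B (Python) =====
-- def _split_actions(is_stationary):
--     n = len(is_stationary)
--     cuts = [-1] + [i for i, s in enumerate(is_stationary) if s] + [n]
--     return [list(range(lo + 1, hi)) for lo, hi in zip(cuts, cuts[1:]) if hi - lo > 1]
-- ===== Notes on version B (the rewrite author's own statement) =====
-- stated objective: alternative
-- what changed: Instead of accumulating a current segment per frame, B collects the positions of the stationary frames as cut points (with sentinels -1 and n) and emits the index range between each pair of consecutive cuts that encloses at least one frame.
import Mathlib
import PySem

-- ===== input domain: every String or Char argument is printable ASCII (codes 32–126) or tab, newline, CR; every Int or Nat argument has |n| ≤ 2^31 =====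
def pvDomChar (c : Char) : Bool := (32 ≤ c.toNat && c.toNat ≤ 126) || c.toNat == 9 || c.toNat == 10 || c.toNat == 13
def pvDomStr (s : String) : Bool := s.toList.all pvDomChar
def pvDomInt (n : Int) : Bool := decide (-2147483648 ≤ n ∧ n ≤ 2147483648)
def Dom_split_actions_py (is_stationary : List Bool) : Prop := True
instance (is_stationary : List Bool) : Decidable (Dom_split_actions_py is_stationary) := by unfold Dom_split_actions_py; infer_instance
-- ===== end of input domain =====

-- B replaces the per-frame segment accumulator by cut points: it collects the stationary
-- positions (with sentinels -1 and n) and emits the index range between consecutive cuts.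

-- ===== PORT A =====
-- the for-loop of A: state (action_segments, current_segment), frame index i
def splitA_loop : List Bool → Int → List (List Int) → List Int → List (List Int)
  | [], _, segs, cur => if cur ≠ [] then segs ++ [cur] else segs
  | b :: rest, i, segs, cur =>
    if b then
      if cur ≠ [] then splitA_loop rest (i + 1) (segs ++ [cur]) [] else splitA_loop rest (i + 1) segs cur
    else
      splitA_loop rest (i + 1) segs (cur ++ [i])

def split_actions_py (is_stationary : List Bool) : List (List Int) :=
  splitA_loop is_stationary 0 [] []

-- ===== PORT B =====
-- [i for i, s in enumerate(is_stationary) if s], indices starting at i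
def splitB_trueIdx : Int → List Bool → List Int
  | _, [] => []
  | i, b :: rest => if b then i :: splitB_trueIdx (i + 1) rest else splitB_trueIdx (i + 1) rest

def split_actions_py_alt (is_stationary : List Bool) : List (List Int) :=
  let n : Int := is_stationary.length
  let cuts : List Int := [-1] ++ splitB_trueIdx 0 is_stationary ++ [n]
  (cuts.zip cuts.tail).filterMap
    (fun p => if p.2 - p.1 > 1 then some (PySem.List.pyRange (p.1 + 1) p.2 1) else none)

-- ===== PRECONDITION & SPEC =====
def Spec_split_actions_py (is_stationary : List Bool) (out : List (List Int)) : Prop := out = split_actions_py_alt is_stationary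
instance (is_stationary : List Bool) (out : List (List Int)) : Decidable (Spec_split_actions_py is_stationary out) := by unfold Spec_split_actions_py; infer_instance

-- ===== CLAIM =====
def Claim_equal_split_actions_py : Prop := ∀ (is_stationary : List Bool), Dom_split_actions_py is_stationary → Spec_split_actions_py is_stationary (split_actions_py is_stationary)

-- ===== LEMMAS AND PROOFS =====

-- common normal form: pending segment cur, next frame i, remaining cut points, end sentinel hi
def pvOut (cur : List Int) (i : Int) : List Int → Int → List (List Int)
  | [], hi =>
      if cur ++ PySem.List.pyRange i hi 1 ≠ [] then [cur ++ PySem.List.pyRange i hi 1] else []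
  | c :: cs, hi =>
      (if cur ++ PySem.List.pyRange i c 1 ≠ [] then [cur ++ PySem.List.pyRange i c 1] else []) ++
        pvOut [] (c + 1) cs hi

lemma splitA_loop_append (l : List Bool) : ∀ (i : Int) (segs : List (List Int)) (cur : List Int),
    splitA_loop l i segs cur = segs ++ splitA_loop l i [] cur := by
  induction l with
  | nil =>
    intro i segs cur
    by_cases hc : cur = [] <;> simp [splitA_loop, hc]
  | cons b rest ih =>
    intro i segs cur
    cases b with
    | true =>
      by_cases hc : cur = []
      · simpa [splitA_loop, hc] using ih (i+1) segs cur
      · rw [show splitA_loop (true :: rest) i segs cur = splitA_loop rest (i+1) (segs ++ [cur]) [] from by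
              simp [splitA_loop, hc],
            show splitA_loop (true :: rest) i [] cur = splitA_loop rest (i+1) [cur] [] from by
              simp [splitA_loop, hc],
            ih (i+1) (segs ++ [cur]), ih (i+1) [cur], List.append_assoc]
    | false =>
      simpa [splitA_loop] using ih (i+1) segs (cur ++ [i])

-- absorbing the freshly appended index i into the leading range
lemma pvOut_shift (cuts : List Int) (i : Int) (cur : List Int) (hi : Int)
    (hcuts : ∀ x ∈ cuts, i < x) (hhi : i < hi) :
    pvOut (cur ++ [i]) (i + 1) cuts hi = pvOut cur i cuts hi := by
  cases cuts with
  | nil =>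
    rw [pvOut, pvOut, PySem.List.pyRange_one_cons hhi]
    simp
  | cons c cs =>
    have hc : i < c := hcuts c (by simp)
    rw [pvOut, pvOut, PySem.List.pyRange_one_cons hc]
    simp

lemma splitB_trueIdx_ge (l : List Bool) : ∀ (i x : Int), x ∈ splitB_trueIdx i l → i ≤ x := by
  induction l with
  | nil => intro i x h; simp [splitB_trueIdx] at h
  | cons b rest ih =>
    intro i x h
    cases b with
    | true =>
      rcases (by simpa [splitB_trueIdx] using h : x = i ∨ x ∈ splitB_trueIdx (i+1) rest) with h | h
      · omega
      · have := ih (i+1) x h; omega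
    | false =>
      have := ih (i+1) x (by simpa [splitB_trueIdx] using h); omega

lemma splitA_loop_pvOut (l : List Bool) : ∀ (i : Int) (cur : List Int),
    splitA_loop l i [] cur = pvOut cur i (splitB_trueIdx i l) (i + l.length) := by
  induction l with
  | nil =>
    intro i cur
    rw [show splitB_trueIdx i [] = [] from rfl, pvOut,
        PySem.List.pyRange_one_eq_nil (by simp)]
    by_cases hc : cur = [] <;> simp [splitA_loop, hc]
  | cons b rest ih =>
    intro i cur
    have hlen : i + ((b :: rest).length : Int) = (i + 1) + (rest.length : Int) := by
      push_cast [List.length_cons]; ring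
    cases b with
    | false =>
      rw [show splitA_loop (false :: rest) i [] cur = splitA_loop rest (i+1) [] (cur ++ [i]) from by
            simp [splitA_loop],
          ih (i+1) (cur ++ [i]),
          show splitB_trueIdx i (false :: rest) = splitB_trueIdx (i+1) rest from rfl, hlen,
          pvOut_shift _ _ _ _ (fun x hx => by have := splitB_trueIdx_ge rest (i+1) x hx; omega)
            (by omega)]
    | true =>
      rw [show splitB_trueIdx i (true :: rest) = i :: splitB_trueIdx (i+1) rest from rfl, hlen,
          pvOut, PySem.List.pyRange_one_eq_nil (by omega)]
      by_cases hc : cur = []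
      · rw [show splitA_loop (true :: rest) i [] cur = splitA_loop rest (i+1) [] [] from by
              simp [splitA_loop, hc],
            ih (i+1) []]
        simp [hc]
      · rw [show splitA_loop (true :: rest) i [] cur = splitA_loop rest (i+1) [cur] [] from by
              simp [splitA_loop, hc],
            splitA_loop_append, ih (i+1) []]
        simp [hc]

-- B's zip/filterMap over the cut list is the same normal form
lemma splitB_zip_pvOut (cs : List Int) : ∀ (c hi : Int),
    (((c :: cs) ++ [hi]).zip (cs ++ [hi])).filterMap
      (fun p => if p.2 - p.1 > 1 then some (PySem.List.pyRange (p.1 + 1) p.2 1) else none)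
    = pvOut [] (c + 1) cs hi := by
  induction cs with
  | nil =>
    intro c hi
    by_cases h : hi - c > 1
    · rw [show ((([c] : List Int) ++ [hi]).zip (([] : List Int) ++ [hi])) = [(c, hi)] from rfl]
      simp [pvOut, h, PySem.List.pyRange_one_cons (show c + 1 < hi by omega)]
    · rw [show ((([c] : List Int) ++ [hi]).zip (([] : List Int) ++ [hi])) = [(c, hi)] from rfl]
      simp [pvOut, h, PySem.List.pyRange_one_eq_nil (show hi ≤ c + 1 by omega)]
  | cons c' cs' ih =>
    intro c hi
    rw [show (((c :: c' :: cs') ++ [hi]).zip ((c' :: cs') ++ [hi]))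
          = (c, c') :: (((c' :: cs') ++ [hi]).zip (cs' ++ [hi])) from rfl,
        List.filterMap_cons, pvOut, ih c' hi]
    by_cases h : c' - c > 1
    · simp [h, PySem.List.pyRange_one_cons (show c + 1 < c' by omega)]
    · simp [h, PySem.List.pyRange_one_eq_nil (show c' ≤ c + 1 by omega)]

-- ===== VERDICT =====
theorem split_actions_py_spec : Claim_equal_split_actions_py := by
  intro l _
  show splitA_loop l 0 [] [] = split_actions_py_alt l
  rw [splitA_loop_pvOut l 0 []]
  rw [split_actions_py_alt]
  rw [show ([(-1 : Int)] ++ splitB_trueIdx 0 l ++ [(l.length : Int)])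
        = (-1) :: (splitB_trueIdx 0 l ++ [(l.length : Int)]) from by simp,
      show ((-1 : Int) :: (splitB_trueIdx 0 l ++ [(l.length : Int)])).tail
        = splitB_trueIdx 0 l ++ [(l.length : Int)] from rfl]
  rw [show ((-1 : Int) :: (splitB_trueIdx 0 l ++ [(l.length : Int)]))
        = ((-1 : Int) :: splitB_trueIdx 0 l) ++ [(l.length : Int)] from by simp,
      splitB_zip_pvOut (splitB_trueIdx 0 l) (-1) (l.length : Int)]
  norm_num
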